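-- pv_equiv track=rewrite | github.com/amark071/Automated-Writing-System-for-Papers | src/paper_automation/knowledge_representation/knowledge_spectrum/advanced_representation.py | _find_duplicate_nodes
-- ===== SOURCE A (Python) =====
-- from typing import Dict, List, Set, Tuple, Any, Optional
--
-- def _find_duplicate_nodes(integrated: Dict[str, Any]) -> Dict[str, List[str]]:
--     """查找重复节点"""
--     duplicates = {}
--     node_attributes = {}
--
--     for node_id, node_info in integrated['nodes'].items():
--         attr_key = tuple(sorted(node_info['attributes'].items()))
--         if attr_key not in node_attributes:
--             node_attributes[attr_key] = []
--         node_attributes[attr_key].append(node_id)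
--
--     for attr_key, node_ids in node_attributes.items():
--         if len(node_ids) > 1:
--             duplicates[node_ids[0]] = node_ids[1:]
--
--     return duplicates
-- ===== SOURCE B (Python) =====
-- from typing import Dict, List, Set, Tuple, Any, Optional
--
-- def _find_duplicate_nodes(integrated: Dict[str, Any]) -> Dict[str, List[str]]:
--     """查找重复节点 — nested scans, no grouping dict: each first occurrence scans the suffix."""
--     nodes = list(integrated['nodes'].items())
--     duplicates = {}
--     for i, (node_id, node_info) in enumerate(nodes):
--         k = tuple(sorted(node_info['attributes'].items()))
--         if any(tuple(sorted(info['attributes'].items())) == k for _, info in nodes[:i]):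
--             continue  # not the first occurrence of this attribute set
--         rest = [nid for nid, info in nodes[i+1:]
--                 if tuple(sorted(info['attributes'].items())) == k]
--         if rest:
--             duplicates[node_id] = rest
--     return duplicates
-- ===== Notes on version B (the rewrite author's own statement) =====
-- stated objective: alternative
-- what changed: B drops A's grouping dictionary entirely: it does direct nested scans over the node list - for each node it checks the prefix to see whether its sorted-attribute key occurred before, and at each first occurrence collects the matching node ids from the suffix and emits the group immediately; no intermediate per-key lists, no second pass over a dict, at the cost of quadratic scanning.
import Mathlib
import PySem

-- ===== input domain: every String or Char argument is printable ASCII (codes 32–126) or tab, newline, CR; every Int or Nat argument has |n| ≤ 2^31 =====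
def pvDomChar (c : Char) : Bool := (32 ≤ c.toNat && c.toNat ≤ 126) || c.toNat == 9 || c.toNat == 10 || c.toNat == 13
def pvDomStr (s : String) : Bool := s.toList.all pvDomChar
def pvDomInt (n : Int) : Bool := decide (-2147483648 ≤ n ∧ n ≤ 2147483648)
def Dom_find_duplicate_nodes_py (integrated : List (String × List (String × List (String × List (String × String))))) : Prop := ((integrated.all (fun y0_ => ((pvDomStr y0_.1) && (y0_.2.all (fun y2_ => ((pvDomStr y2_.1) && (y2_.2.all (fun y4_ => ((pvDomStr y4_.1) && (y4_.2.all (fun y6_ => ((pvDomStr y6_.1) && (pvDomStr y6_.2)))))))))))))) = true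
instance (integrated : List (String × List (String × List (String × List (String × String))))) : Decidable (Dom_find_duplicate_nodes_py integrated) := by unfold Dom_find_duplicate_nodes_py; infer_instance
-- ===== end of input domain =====

-- B replaces A's grouping-dict-then-second-pass by direct nested scans over the node list
-- (each first occurrence of an attribute key collects its duplicates from the suffix and is
-- emitted at once): alternative decomposition, quadratic instead of dict-based; equal return
-- value proved under Pre_.

abbrev pvK : Type := List (String × String)

-- attr_key = tuple(sorted(node_info['attributes'].items())): Python sorts the pairs
-- lexicographically, i.e. by the key (fst, snd) — exactly PySem.List.sorted2 (·.1) (·.2).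
def pvAttrKey (info : List (String × List (String × String))) : pvK :=
  PySem.List.sorted2 ((PySem.Dict.get? (PySem.Dict.mk info) "attributes").getD [])
    (fun r => r.1) (fun r => r.2) false

-- ===== PORT A =====
def find_duplicate_nodes_py (integrated : List (String × List (String × List (String × List (String × String))))) : List (String × List String) :=
  -- integrated['nodes'] (KeyError excluded by Pre_)
  let nodes := (PySem.Dict.get? (PySem.Dict.mk integrated) "nodes").getD []
  -- first loop: node_attributes[attr_key] grows by node_id (created as [] when absent)
  let node_attributes : PySem.Dict pvK (List String) :=
    nodes.foldl (fun na p =>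
      let attr_key := pvAttrKey p.2
      let na1 := if na.contains attr_key then na else na.insert attr_key []
      na1.insert attr_key (na1.getD attr_key [] ++ [p.1])) PySem.Dict.empty
  -- second loop: duplicates[node_ids[0]] = node_ids[1:]
  (node_attributes.items.foldl (fun dup q =>
      if q.2.length > 1 then
        dup.insert ((PySem.List.pyGet? q.2 0).getD "") (PySem.List.slice q.2 (some 1) none)
      else dup)
    (PySem.Dict.empty : PySem.Dict String (List String))).items

-- ===== PORT B =====
def find_duplicate_nodes_py_alt (integrated : List (String × List (String × List (String × List (String × String))))) : List (String × List String) :=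
  let nodes := (PySem.Dict.get? (PySem.Dict.mk integrated) "nodes").getD []
  -- for i, (node_id, node_info) in enumerate(nodes): …
  ((PySem.List.enumerate nodes 0).foldl (fun dup q =>
      let k := pvAttrKey q.2.2
      -- if any(… == k for _, info in nodes[:i]): continue
      if (PySem.List.slice nodes none (some q.1)).any (fun r => pvAttrKey r.2 == k) then dup
      else
        -- rest = [nid for nid, info in nodes[i+1:] if … == k]
        let rest := ((PySem.List.slice nodes (some (q.1 + 1)) none).filter
          (fun r => pvAttrKey r.2 == k)).map Prod.fst
        if !rest.isEmpty then dup.insert q.2.1 rest else dup)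
    (PySem.Dict.empty : PySem.Dict String (List String))).items

-- ===== PRECONDITION & SPEC =====
-- Pre_ excludes (a) inputs where Python A raises KeyError ('nodes' absent, or some node_info
-- without 'attributes'), and (b) association lists with duplicate keys at any dict level:
-- those do not represent any Python dict (building the dict collapses them), so neither
-- program's value on them is specified.
def Pre_find_duplicate_nodes_py (integrated : List (String × List (String × List (String × List (String × String))))) : Prop :=
  (integrated.map Prod.fst).Nodup ∧
  "nodes" ∈ integrated.map Prod.fst ∧
  ∀ p ∈ integrated, p.1 = "nodes" →
    ((p.2.map Prod.fst).Nodup ∧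
     ∀ q ∈ p.2,
       (q.2.map Prod.fst).Nodup ∧ "attributes" ∈ q.2.map Prod.fst ∧
       ∀ r ∈ q.2, r.1 = "attributes" → (r.2.map Prod.fst).Nodup)
instance (integrated : List (String × List (String × List (String × List (String × String))))) : Decidable (Pre_find_duplicate_nodes_py integrated) := by unfold Pre_find_duplicate_nodes_py; infer_instance

def pvWitness_find_duplicate_nodes_py : (List (String × List (String × List (String × List (String × String))))) :=
  [("nodes", [("a", [("attributes", [("c", "1")])]), ("b", [("attributes", [("c", "1")])])])]

def Spec_find_duplicate_nodes_py (integrated : List (String × List (String × List (String × List (String × String))))) (out : List (String × List String)) : Prop := out = find_duplicate_nodes_py_alt integrated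
instance (integrated : List (String × List (String × List (String × List (String × String))))) (out : List (String × List String)) : Decidable (Spec_find_duplicate_nodes_py integrated out) := by unfold Spec_find_duplicate_nodes_py; infer_instance

-- ===== CLAIM (what is proved, stated in full; the proofs are below) =====
def Claim_equal_find_duplicate_nodes_py : Prop := ∀ (integrated : List (String × List (String × List (String × List (String × String))))), Dom_find_duplicate_nodes_py integrated → Pre_find_duplicate_nodes_py integrated → Spec_find_duplicate_nodes_py integrated (find_duplicate_nodes_py integrated)

-- ===== LEMMAS AND PROOFS =====

abbrev pvNode : Type := String × List (String × List (String × String))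

-- shared abstract description: per-key group of node ids, in input order
def pvKey (p : pvNode) : pvK := pvAttrKey p.2
def pvGrp (l : List pvNode) (k : pvK) : List String :=
  (l.filter (fun p => pvKey p == k)).map Prod.fst
def pvS (l : List pvNode) : List pvK := PySem.Set.ofList (l.map pvKey)
def pvHd (l : List pvNode) (k : pvK) : String := (PySem.List.pyGet? (pvGrp l k) 0).getD ""
def pvTl (l : List pvNode) (k : pvK) : List String := PySem.List.slice (pvGrp l k) (some 1) none
def pvOut (l : List pvNode) (cond : pvK → Bool) : List (String × List String) :=
  ((pvS l).filter cond).map (fun k => (pvHd l k, pvTl l k))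
def pvCondA (l : List pvNode) (k : pvK) : Bool := decide ((pvGrp l k).length > 1)

theorem pv_filterMap_if {α β : Type} (p : α → Prop) [DecidablePred p] (f : α → β) (S : List α) :
    S.filterMap (fun k => if p k then some (f k) else none)
      = (S.filter (fun k => decide (p k))).map f := by
  induction S with
  | nil => rfl
  | cons a t ih => by_cases h : p a <;> simp [h, ih]

theorem pv_mem_S (l : List pvNode) (k : pvK) : k ∈ pvS l ↔ k ∈ l.map pvKey := by
  simp [pvS, PySem.Set.mem_ofList]

theorem pv_mem_grp {l : List pvNode} {k : pvK} {x : String} (h : x ∈ pvGrp l k) :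
    ∃ p ∈ l, p.1 = x ∧ pvKey p = k := by
  simp only [pvGrp, List.mem_map, List.mem_filter] at h
  obtain ⟨p, ⟨hp, hk⟩, hx⟩ := h
  exact ⟨p, hp, hx, by simpa using hk⟩

theorem pv_grp_ne_nil (l : List pvNode) (k : pvK) : k ∈ l.map pvKey ↔ pvGrp l k ≠ [] := by
  constructor
  · intro h hnil
    obtain ⟨p, hp, hpk⟩ := List.mem_map.1 h
    have hmem : p ∈ l.filter (fun p => pvKey p == k) := List.mem_filter.2 ⟨hp, by simp [hpk]⟩
    have : p.1 ∈ pvGrp l k := List.mem_map.2 ⟨p, hmem, rfl⟩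
    simp [hnil] at this
  · intro h
    rcases hg : pvGrp l k with _ | ⟨a, t⟩
    · exact absurd hg h
    · have : a ∈ pvGrp l k := by rw [hg]; exact List.mem_cons_self
      obtain ⟨p, hp, hpa, hpk⟩ := pv_mem_grp this
      exact List.mem_map.2 ⟨p, hp, hpk⟩

theorem pv_hd_eq_head {l : List pvNode} {k : pvK} {a : String} {t : List String}
    (h : pvGrp l k = a :: t) : pvHd l k = a := by
  simp [pvHd, h, PySem.List.pyGet?, PySem.List.pyIdx?]

theorem pv_tl_eq_tail {l : List pvNode} {k : pvK} {a : String} {t : List String}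
    (h : pvGrp l k = a :: t) : pvTl l k = t := by
  simp [pvTl, h, PySem.List.slice_from_one]

theorem pv_hd_mem {l : List pvNode} {k : pvK} (h : k ∈ l.map pvKey) : pvHd l k ∈ pvGrp l k := by
  rcases hg : pvGrp l k with _ | ⟨a, t⟩
  · exact absurd hg ((pv_grp_ne_nil l k).1 h)
  · rw [pv_hd_eq_head hg]; exact List.mem_cons_self ..

theorem pv_hd_inj {l : List pvNode} (hn : (l.map Prod.fst).Nodup) :
    ∀ k1 k2, k1 ∈ l.map pvKey → k2 ∈ l.map pvKey → pvHd l k1 = pvHd l k2 → k1 = k2 := by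
  intro k1 k2 h1 h2 he
  obtain ⟨p1, hp1, hx1, hk1⟩ := pv_mem_grp (pv_hd_mem h1)
  obtain ⟨p2, hp2, hx2, hk2⟩ := pv_mem_grp (pv_hd_mem h2)
  have : p1 = p2 := List.inj_on_of_nodup_map hn hp1 hp2 (by rw [hx1, hx2, he])
  rw [← hk1, ← hk2, this]

theorem pv_S_append (p : List pvNode) (q : pvNode) :
    pvS (p ++ [q]) = PySem.Set.add (pvS p) (pvKey q) := by
  simp [pvS, PySem.Set.ofList_eq_foldl, List.foldl_append]

-- A's first loop builds exactly the first-occurrence-ordered groups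
theorem pvA1 (l : List pvNode) :
    (l.foldl (fun na p =>
      let attr_key := pvAttrKey p.2
      let na1 := if na.contains attr_key then na else na.insert attr_key []
      na1.insert attr_key (na1.getD attr_key [] ++ [p.1])) PySem.Dict.empty).items
    = (pvS l).map (fun k => (k, pvGrp l k)) := by
  have hstep : ∀ (na : PySem.Dict pvK (List String)), ∀ p ∈ l,
      (let attr_key := pvAttrKey p.2
       let na1 := if na.contains attr_key then na else na.insert attr_key []
       na1.insert attr_key (na1.getD attr_key [] ++ [p.1]))
      = na.modify (pvKey p) [] (fun v => v ++ [p.1]) := by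
    intro na p _
    show (let attr_key := pvAttrKey p.2
          let na1 := if na.contains attr_key then na else na.insert attr_key []
          na1.insert attr_key (na1.getD attr_key [] ++ [p.1])) = _
    by_cases h : na.contains (pvAttrKey p.2) = true
    · simp only [h, if_true]
      rfl
    · simp only [Bool.not_eq_true] at h
      simp only [h, Bool.false_eq_true, if_false, pvKey]
      show (na.insert (pvAttrKey p.2) []).insert (pvAttrKey p.2)
            ((na.insert (pvAttrKey p.2) []).getD (pvAttrKey p.2) [] ++ [p.1])
          = na.insert (pvAttrKey p.2) (na.getD (pvAttrKey p.2) [] ++ [p.1])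
      rw [PySem.Dict.getD_of_not_contains na [] h,
        PySem.Dict.getD_insert_self, PySem.Dict.insert_insert_self]
  rw [PySem.List.foldl_congr_mem _ _ _ _ hstep]
  have hnodup : (l.foldl (fun na p => na.modify (pvKey p) [] (fun v => v ++ [p.1]))
      (PySem.Dict.empty : PySem.Dict pvK (List String))).keys.Nodup := by
    exact PySem.Dict.nodup_keys_foldl_modify_key l pvKey []
      (fun _ p => fun v => v ++ [p.1]) PySem.Dict.empty (by simp [PySem.Dict.keys_empty])
  rw [PySem.Dict.items_eq_map_keys _ hnodup []]
  have hkeys : (l.foldl (fun na p => na.modify (pvKey p) [] (fun v => v ++ [p.1]))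
      (PySem.Dict.empty : PySem.Dict pvK (List String))).keys = pvS l := by
    rw [PySem.Dict.keys_foldl_modify_key l pvKey [] (fun _ p => fun v => v ++ [p.1])]
    rw [PySem.Dict.keys_empty, pvS, PySem.Set.ofList_eq_foldl]
    rfl
  rw [hkeys]
  refine List.map_congr_left (fun k _ => ?_)
  have hg : (l.foldl (fun na p => na.modify (pvKey p) [] (fun v => v ++ [p.1]))
      (PySem.Dict.empty : PySem.Dict pvK (List String))).getD k [] = pvGrp l k := by
    have hml : ((l.map (fun p => (pvKey p, p.1))).foldl
          (fun (na : PySem.Dict pvK (List String)) r => na.modify r.1 [] (fun v => v ++ [r.2]))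
          PySem.Dict.empty)
        = l.foldl (fun na p => na.modify (pvKey p) [] (fun v => v ++ [p.1])) PySem.Dict.empty :=
      List.foldl_map
    rw [← hml]
    rw [PySem.Dict.getD_foldl_modify_append, PySem.Dict.getD_empty]
    rw [List.filter_map]
    simp [pvGrp, Function.comp_def]
  rw [hg]

-- a fold of fresh-key inserts guarded by `len > 1` appends the qualifying entries
def pvG (q : pvK × List String) : Option (String × List String) :=
  if q.2.length > 1 then some ((PySem.List.pyGet? q.2 0).getD "", PySem.List.slice q.2 (some 1) none) else none

theorem pvF (L : List (pvK × List String)) (d : PySem.Dict String (List String))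
    (h : (d.keys ++ (L.filterMap pvG).map Prod.fst).Nodup) :
    (L.foldl (fun dup q =>
      if q.2.length > 1 then
        dup.insert ((PySem.List.pyGet? q.2 0).getD "") (PySem.List.slice q.2 (some 1) none)
      else dup) d).items = d.items ++ L.filterMap pvG := by
  induction L generalizing d with
  | nil => simp
  | cons q L ih =>
    by_cases hq : q.2.length > 1
    · have hfm : (q :: L).filterMap pvG
          = ((PySem.List.pyGet? q.2 0).getD "", PySem.List.slice q.2 (some 1) none)
              :: L.filterMap pvG := by
        rw [List.filterMap_cons]; simp only [pvG, if_pos hq]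
      rw [hfm, List.map_cons] at h
      have hkey : ((PySem.List.pyGet? q.2 0).getD "") ∉ d.keys := by
        have h' := List.disjoint_of_nodup_append h
        intro hmem
        exact h' hmem List.mem_cons_self
      rw [List.append_cons] at h
      have hc : d.contains ((PySem.List.pyGet? q.2 0).getD "") = false := by
        rw [PySem.Dict.contains_eq_decide_mem_keys]; simp [hkey]
      simp only [List.foldl_cons, if_pos hq]
      rw [ih _ (by rw [PySem.Dict.keys_insert_of_not_contains d _ hc]; exact h)]
      rw [PySem.Dict.items_insert_of_not_contains d _ hc, hfm]
      simp
    · simp only [List.foldl_cons, if_neg hq]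
      have hfm : (q :: L).filterMap pvG = L.filterMap pvG := by
        rw [List.filterMap_cons]; simp only [pvG, if_neg hq]
      rw [hfm] at h ⊢
      exact ih d h

theorem pvA_char (l : List pvNode) (hn : (l.map Prod.fst).Nodup) :
    ((l.foldl (fun na p =>
      let attr_key := pvAttrKey p.2
      let na1 := if na.contains attr_key then na else na.insert attr_key []
      na1.insert attr_key (na1.getD attr_key [] ++ [p.1])) PySem.Dict.empty).items.foldl
      (fun dup q =>
        if q.2.length > 1 then
          dup.insert ((PySem.List.pyGet? q.2 0).getD "") (PySem.List.slice q.2 (some 1) none)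
        else dup)
      (PySem.Dict.empty : PySem.Dict String (List String))).items
    = pvOut l (pvCondA l) := by
  rw [pvA1]
  have hout : (((pvS l).map (fun k => (k, pvGrp l k))).filterMap pvG) = pvOut l (pvCondA l) := by
    rw [List.filterMap_map]
    have hfun : pvG ∘ (fun k => (k, pvGrp l k))
        = fun k => if (pvGrp l k).length > 1 then some (pvHd l k, pvTl l k) else none := by
      funext k
      simp [pvG, pvHd, pvTl]
    rw [hfun, pv_filterMap_if (fun k => (pvGrp l k).length > 1) (fun k => (pvHd l k, pvTl l k))]
    rfl
  have hnod : ((PySem.Dict.empty : PySem.Dict String (List String)).keys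
      ++ (((pvS l).map (fun k => (k, pvGrp l k))).filterMap pvG).map Prod.fst).Nodup := by
    rw [hout, PySem.Dict.keys_empty]
    simp only [List.nil_append, pvOut, List.map_map]
    refine List.Nodup.map_on ?_ (((PySem.Set.nodup_ofList _).filter _))
    intro x hx y hy he
    have hx' : x ∈ l.map pvKey := (pv_mem_S l x).1 (List.mem_of_mem_filter hx)
    have hy' : y ∈ l.map pvKey := (pv_mem_S l y).1 (List.mem_of_mem_filter hy)
    exact pv_hd_inj hn x y hx' hy' (by simpa using he)
  rw [pvF _ _ hnod, hout]
  rfl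

-- ---- B side: the nested-scan fold over enumerate ----

-- the tail-nonempty test IS the `len > 1` test
theorem pv_cond_tail (l : List pvNode) (k : pvK) :
    (!(pvTl l k).isEmpty) = pvCondA l k := by
  rcases hg : pvGrp l k with _ | ⟨a, _ | ⟨b, t⟩⟩ <;>
    simp [pvTl, pvCondA, hg, PySem.List.slice_from_one]

-- B's loop body as a named step function over the full list l
def pvBstep (l : List pvNode) (dup : PySem.Dict String (List String)) (q : Int × pvNode) :
    PySem.Dict String (List String) :=
  let k := pvAttrKey q.2.2
  if (PySem.List.slice l none (some q.1)).any (fun r => pvAttrKey r.2 == k) then dup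
  else
    let rest := ((PySem.List.slice l (some (q.1 + 1)) none).filter
      (fun r => pvAttrKey r.2 == k)).map Prod.fst
    if !rest.isEmpty then dup.insert q.2.1 rest else dup

-- invariant of B's loop over the first j entries
theorem pvB_inv (l : List pvNode) (hn : (l.map Prod.fst).Nodup) :
    ∀ j, j ≤ l.length →
    (((PySem.List.enumerate l 0).take j).foldl (pvBstep l)
        (PySem.Dict.empty : PySem.Dict String (List String))).items
      = ((pvS (l.take j)).filter (pvCondA l)).map (fun k => (pvHd l k, pvTl l k)) := by
  intro j hj
  induction j with
  | zero => simp [pvS, PySem.Set.ofList]; rfl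
  | succ j ih =>
    have hjl : j < l.length := hj
    have ihj := ih (Nat.le_of_lt hjl)
    have htake : (PySem.List.enumerate l 0).take (j + 1)
        = (PySem.List.enumerate l 0).take j ++ [((j : Int), l[j])] := by
      rw [List.take_add_one, PySem.List.getElem?_enumerate]
      simp [List.getElem?_eq_getElem hjl]
    rw [htake, List.foldl_append, List.foldl_cons, List.foldl_nil]
    set D := ((PySem.List.enumerate l 0).take j).foldl (pvBstep l)
        (PySem.Dict.empty : PySem.Dict String (List String)) with hD
    -- facts about the (j+1)-st step
    have hsliceL : PySem.List.slice l none (some ((j : Int))) = l.take j :=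
      PySem.List.slice_to_natCast l j
    have hsliceR : PySem.List.slice l (some ((j : Int) + 1)) none = l.drop (j + 1) := by
      have : ((j : Int) + 1) = ((j + 1 : Nat) : Int) := by push_cast; ring
      rw [this, PySem.List.slice_from_natCast]
    have htakeS : l.take (j + 1) = l.take j ++ [l[j]] :=
      (List.take_add_one).trans (by simp [List.getElem?_eq_getElem hjl])
    set k := pvKey l[j] with hk
    have hany : (l.take j).any (fun r => pvAttrKey r.2 == k)
        = decide (k ∈ (l.take j).map pvKey) := by
      by_cases hm : k ∈ (l.take j).map pvKey
      · simp only [hm, decide_true]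
        obtain ⟨p, hp, hpk⟩ := List.mem_map.1 hm
        exact List.any_eq_true.2 ⟨p, hp, by simp [pvKey] at hpk ⊢; exact hpk⟩
      · simp only [hm, decide_false]
        refine List.any_eq_false.2 (fun p hp hbe => ?_)
        exact hm (List.mem_map.2 ⟨p, hp, by simpa using hbe⟩)
    by_cases hm : k ∈ (l.take j).map pvKey
    · -- not a first occurrence: dup unchanged, pvS unchanged
      have hS : pvS (l.take (j + 1)) = pvS (l.take j) := by
        rw [htakeS, pv_S_append, PySem.Set.add_of_mem ((pv_mem_S _ _).2 hm)]
      rw [hS]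
      show (pvBstep l D ((j : Int), l[j])).items = _
      unfold pvBstep
      simp only [hsliceL, hsliceR]
      rw [show (fun r : pvNode => pvAttrKey r.2 == pvAttrKey (l[j]).2)
            = (fun r : pvNode => pvAttrKey r.2 == k) from rfl, hany]
      simp only [hm, decide_true, if_true]
      exact ihj
    · -- first occurrence of k at index j
      have hS : pvS (l.take (j + 1)) = pvS (l.take j) ++ [k] := by
        rw [htakeS, pv_S_append,
          PySem.Set.add_of_not_mem (fun hc => hm ((pv_mem_S _ _).1 hc))]
      have hfilnil : (l.take j).filter (fun p => pvKey p == k) = [] := by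
        refine List.filter_eq_nil_iff.2 (fun p hp hbe => ?_)
        exact hm (List.mem_map.2 ⟨p, hp, by simpa using hbe⟩)
      have hldecomp : l = l.take j ++ [l[j]] ++ l.drop (j + 1) := by
        rw [← htakeS, List.take_append_drop]
      have hgrp : pvGrp l k = l[j].1 :: pvGrp (l.drop (j + 1)) k := by
        conv_lhs => rw [hldecomp]
        simp only [pvGrp, List.filter_append, hfilnil, List.map_append, List.nil_append]
        simp [← hk]
      have hrest : ((l.drop (j + 1)).filter (fun r => pvAttrKey r.2 == k)).map Prod.fst
          = pvTl l k := by
        rw [pv_tl_eq_tail hgrp]; rfl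
      have hkmem : k ∈ l.map pvKey := List.mem_map.2 ⟨l[j], List.getElem_mem hjl, rfl⟩
      show (pvBstep l D ((j : Int), l[j])).items = _
      unfold pvBstep
      simp only [hsliceL, hsliceR]
      rw [show (fun r : pvNode => pvAttrKey r.2 == pvAttrKey (l[j]).2)
            = (fun r : pvNode => pvAttrKey r.2 == k) from rfl, hany]
      simp only [hm, decide_false, Bool.false_eq_true, if_false]
      rw [hrest, pv_cond_tail]
      rw [hS, List.filter_append, List.map_append, List.filter_cons, List.filter_nil]
      by_cases hc : pvCondA l k = true
      · simp only [hc, if_true]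
        -- l[j].1 is a fresh key of D: D's keys are heads of groups first seen before j
        have hcont : D.contains l[j].1 = false := by
          rw [PySem.Dict.contains_eq_decide_mem_keys]
          simp only [PySem.Dict.keys, ihj, List.map_map, decide_eq_false_iff_not,
            List.mem_map]
          rintro ⟨k', hk', he⟩
          have hk'mem : k' ∈ (l.take j).map pvKey :=
            (pv_mem_S _ _).1 (List.mem_of_mem_filter hk')
          have hk'l : k' ∈ l.map pvKey := by
            obtain ⟨p, hp, hpk⟩ := List.mem_map.1 hk'mem
            exact List.mem_map.2 ⟨p, List.mem_of_mem_take hp, hpk⟩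
          have hhd : pvHd l k = l[j].1 := pv_hd_eq_head hgrp
          have : k' = k := pv_hd_inj hn k' k hk'l hkmem (by simpa [hhd] using he)
          exact hm (this ▸ hk'mem)
        rw [PySem.Dict.items_insert_of_not_contains D _ hcont, ihj]
        simp [pv_hd_eq_head hgrp, pv_tl_eq_tail hgrp]
      · simp only [hc, Bool.false_eq_true, if_false]
        rw [List.map_nil, List.append_nil]
        exact ihj

-- B's port equals the common description pvOut
theorem pvB_char (l : List pvNode) (hn : (l.map Prod.fst).Nodup) :
    ((PySem.List.enumerate l 0).foldl (pvBstep l)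
        (PySem.Dict.empty : PySem.Dict String (List String))).items
      = pvOut l (pvCondA l) := by
  have h := pvB_inv l hn l.length le_rfl
  rw [List.take_of_length_le (by rw [PySem.List.length_enumerate]), List.take_length] at h
  exact h

-- ===== VERDICT (by name: the statement is the Claim_ definition above) =====
theorem find_duplicate_nodes_py_spec : Claim_equal_find_duplicate_nodes_py := by
  intro integrated _ hpre
  obtain ⟨hnod0, hmemn, hall⟩ := hpre
  obtain ⟨nodes, hget⟩ : ∃ v, (PySem.Dict.mk integrated).get? "nodes" = some v := by
    rcases h : (PySem.Dict.mk integrated).get? "nodes" with _ | v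
    · exact absurd hmemn ((PySem.Dict.get?_eq_none_iff_not_mem_keys _ _).1 h)
    · exact ⟨v, rfl⟩
  have hmemi : ("nodes", nodes) ∈ integrated :=
    PySem.Dict.mem_items_of_get?_eq_some _ hget
  have hnodes : (nodes.map Prod.fst).Nodup := (hall ("nodes", nodes) hmemi rfl).1
  show find_duplicate_nodes_py integrated = find_duplicate_nodes_py_alt integrated
  have hA : find_duplicate_nodes_py integrated = pvOut nodes (pvCondA nodes) := by
    unfold find_duplicate_nodes_py
    rw [hget]
    exact pvA_char nodes hnodes
  have hB : find_duplicate_nodes_py_alt integrated = pvOut nodes (pvCondA nodes) := by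
    unfold find_duplicate_nodes_py_alt
    rw [hget]
    exact pvB_char nodes hnodes
  exact hA.trans hB.symm
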